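-- pv_equiv track=rewrite | github.com/yigtuyumz/lowc | extract_opcodes.py | format_as_python_bytes
-- ===== SOURCE A (Python) =====
-- def format_as_python_bytes(opcodes):
--     if not opcodes:
--         return None
--     result = "sc = b'"
--     for i, byte in enumerate(opcodes):
--         if i > 0 and i % 16 == 0:
--             result += "\\\n    "
--         result += f'\\x{byte}'
--     result += "'"
--     return result
-- ===== SOURCE B (Python) =====
-- def format_as_python_bytes(opcodes):
--     if not opcodes:
--         return None
--     parts = ['\\x' + byte for byte in opcodes]
--     lines = []
--     i = 0
--     while i < len(parts):
--         lines.append(''.join(parts[i:i+16]))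
--         i += 16
--     return "sc = b'" + '\\\n    '.join(lines) + "'"
-- ===== Notes on version B (the rewrite author's own statement) =====
-- stated objective: simpler
-- what changed: B maps each byte to its '\x..' token once, slices the token list into 16-wide chunks and joins the chunk lines with the continuation separator, replacing A's enumerate loop that tests 'i % 16 == 0' on every index to decide where to splice the separator into the growing string.
import Mathlib
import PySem

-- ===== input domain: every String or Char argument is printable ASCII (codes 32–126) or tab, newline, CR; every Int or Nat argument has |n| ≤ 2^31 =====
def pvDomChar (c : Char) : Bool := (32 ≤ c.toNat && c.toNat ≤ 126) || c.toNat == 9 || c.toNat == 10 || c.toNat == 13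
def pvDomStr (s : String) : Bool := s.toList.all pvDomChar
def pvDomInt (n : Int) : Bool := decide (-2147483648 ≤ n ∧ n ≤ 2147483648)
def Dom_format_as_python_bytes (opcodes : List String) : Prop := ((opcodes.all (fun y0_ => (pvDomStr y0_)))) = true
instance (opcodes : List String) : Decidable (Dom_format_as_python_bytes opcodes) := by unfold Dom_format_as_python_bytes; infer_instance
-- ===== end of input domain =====

-- B regroups the byte tokens into 16-wide chunks and joins them with the separator,
-- instead of A's indexed loop with a mod-16 test; objective: simpler decomposition.

-- ===== PORT A =====
-- A: indexed fold over enumerate(opcodes); a separator is inserted before every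
-- element whose index is a positive multiple of 16.
def format_as_python_bytes (opcodes : List String) : Option String :=
  if opcodes = [] then none
  else
    let result := "sc = b'"
    let result := (PySem.List.enumerate opcodes).foldl
      (fun result p =>
        let result := if 0 < p.1 ∧ PySem.Int.mod p.1 16 = 0 then result ++ "\\\n    " else result
        result ++ ("\\x" ++ p.2)) result
    some (result ++ "'")

-- ===== PORT B =====
-- Source B's while loop: i strides over parts in steps of 16, each step appending
-- the joined slice parts[i:i+16] as one line.
def bLines (parts : List String) (i : Nat) : List String :=
  if i < parts.length then
    PySem.Str.join "" (PySem.List.slice parts (some (i : Int)) (some ((i : Int) + 16))) :: bLines parts (i + 16)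
  else []
termination_by parts.length - i
decreasing_by
  rename_i h
  omega

def format_as_python_bytes_alt (opcodes : List String) : Option String :=
  if opcodes = [] then none
  else
    let parts := opcodes.map (fun byte => "\\x" ++ byte)
    let lines := bLines parts 0
    some ("sc = b'" ++ PySem.Str.join "\\\n    " lines ++ "'")

-- ===== PRECONDITION & SPEC =====
def Spec_format_as_python_bytes (opcodes : List String) (out : Option String) : Prop := out = format_as_python_bytes_alt opcodes
instance (opcodes : List String) (out : Option String) : Decidable (Spec_format_as_python_bytes opcodes out) := by unfold Spec_format_as_python_bytes; infer_instance

-- ===== CLAIM (what is proved, stated in full; the proofs are below) =====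
def Claim_equal_format_as_python_bytes : Prop := ∀ (opcodes : List String), Dom_format_as_python_bytes opcodes → Spec_format_as_python_bytes opcodes (format_as_python_bytes opcodes)

-- ===== LEMMAS AND PROOFS =====

-- proof-side view of the while loop: chunks of a list, front to back
def bChunkLines (parts : List String) : List String :=
  if parts = [] then []
  else PySem.Str.join "" (parts.take 16) :: bChunkLines (parts.drop 16)
termination_by parts.length
decreasing_by
  rename_i h
  have := List.length_pos_of_ne_nil h
  simp only [List.length_drop]; omega

theorem bLines_eq_bChunkLines (n : Nat) (parts : List String) (i : Nat)
    (hn : parts.length - i ≤ n) : bLines parts i = bChunkLines (parts.drop i) := by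
  induction n generalizing i with
  | zero =>
      have hge : ¬ i < parts.length := by omega
      rw [bLines, if_neg hge, bChunkLines, if_pos (List.drop_eq_nil_of_le (by omega))]
  | succ n ih =>
      by_cases hi : i < parts.length
      · rw [bLines, if_pos hi]
        have hs : PySem.List.slice parts (some (i : Int)) (some ((i : Int) + 16))
            = (parts.drop i).take 16 := by
          have := PySem.List.slice_natCast_add (xs := parts) (j := i) (n := 16)
          simpa using this
        rw [hs, ih (i + 16) (by omega)]
        have hne : List.drop i parts ≠ [] := by
          simp only [ne_eq, List.drop_eq_nil_iff]; omega
        conv_rhs => rw [bChunkLines, if_neg hne, List.drop_drop]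
      · rw [bLines, if_neg hi, bChunkLines, if_pos (List.drop_eq_nil_of_le (by omega))]

theorem strJoin_nil (sep : String) : PySem.Str.join sep [] = "" := by
  simp [PySem.Str.join, PySem.Chars.join_nil]

theorem strJoin_singleton (sep a : String) : PySem.Str.join sep [a] = a := by
  simp [PySem.Str.join, PySem.Chars.join_singleton]

theorem strJoin_cons_cons (sep a b : String) (r : List String) :
    PySem.Str.join sep (a :: b :: r) = a ++ sep ++ PySem.Str.join sep (b :: r) := by
  simp [PySem.Str.join, PySem.Chars.join_cons_cons, String.append_assoc]

theorem strJoin_cons_of_ne_nil (sep a : String) (r : List String) (h : r ≠ []) :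
    PySem.Str.join sep (a :: r) = a ++ sep ++ PySem.Str.join sep r := by
  cases r with
  | nil => exact absurd rfl h
  | cons b t => exact strJoin_cons_cons sep a b t

theorem strJoin_empty_cons (a : String) (r : List String) :
    PySem.Str.join "" (a :: r) = a ++ PySem.Str.join "" r := by
  cases r with
  | nil => simp [strJoin_singleton, strJoin_nil]
  | cons b t => simp [strJoin_cons_cons]

-- pointwise description of A's loop body as a function of the running index
def gBody : Nat → List String → String
  | _, [] => ""
  | k, b :: t => (if 0 < k ∧ k % 16 = 0 then "\\\n    " else "") ++ ("\\x" ++ b) ++ gBody (k + 1) t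

-- the chunked body that B produces
def hBody (l : List String) : String :=
  if l = [] then ""
  else PySem.Str.join "" ((l.take 16).map (fun b => "\\x" ++ b)) ++
    (if l.drop 16 = [] then "" else "\\\n    " ++ hBody (l.drop 16))
termination_by l.length
decreasing_by
  rename_i h
  have := List.length_pos_of_ne_nil h
  simp only [List.length_drop] at this ⊢; omega

theorem hBody_nil : hBody [] = "" := by
  rw [hBody.eq_def]; simp

theorem hBody_cons (b : String) (t : List String) :
    hBody (b :: t) = PySem.Str.join "" (((b :: t).take 16).map (fun x => "\\x" ++ x)) ++
      (if (b :: t).drop 16 = [] then "" else "\\\n    " ++ hBody ((b :: t).drop 16)) := by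
  rw [hBody.eq_def]; simp

theorem bChunkLines_nil : bChunkLines [] = [] := by
  rw [bChunkLines]; simp

theorem bChunkLines_ne_nil (l : List String) (h : l ≠ []) : bChunkLines l ≠ [] := by
  rw [bChunkLines, if_neg h]; simp

theorem foldA_eq_gBody (l : List String) (k : Nat) (acc : String) :
    (PySem.List.enumerate l (k : Int)).foldl
      (fun result p =>
        let result := if 0 < p.1 ∧ PySem.Int.mod p.1 16 = 0 then result ++ "\\\n    " else result
        result ++ ("\\x" ++ p.2)) acc = acc ++ gBody k l := by
  induction l generalizing k acc with
  | nil => simp [PySem.List.enumerate, gBody]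
  | cons b t ih =>
      rw [PySem.List.enumerate_cons]
      simp only [List.foldl_cons]
      have hmod : PySem.Int.mod (k : Int) 16 = ((k % 16 : Nat) : Int) := by
        exact_mod_cast PySem.Int.mod_natCast k 16
      have hc : (0 < ((k : Int), b).1 ∧ PySem.Int.mod ((k : Int), b).1 16 = 0) ↔ (0 < k ∧ k % 16 = 0) := by
        simp only [hmod]
        constructor
        · rintro ⟨h1, h2⟩; constructor <;> omega
        · rintro ⟨h1, h2⟩; constructor <;> omega
      have hk1 : ((k : Int) + 1) = ((k + 1 : Nat) : Int) := by push_cast; ring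
      rw [hk1, ih]
      by_cases h : 0 < k ∧ k % 16 = 0
      · simp only [if_pos (hc.mpr h)]
        simp [gBody, if_pos h, String.append_assoc]
      · simp only [if_neg (fun hh => h (hc.mp hh))]
        simp [gBody, if_neg h, String.append_assoc]

-- stepping through m consecutive indices none of which is ≡ 0 (mod 16)
theorem gBody_run (m : Nat) (l : List String) (k : Nat)
    (hm : ∀ j, j < m → (k + j) % 16 ≠ 0) :
    gBody k l = PySem.Str.join "" ((l.take m).map (fun b => "\\x" ++ b)) ++ gBody (k + m) (l.drop m) := by
  induction m generalizing l k with
  | zero => simp [strJoin_nil]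
  | succ m ih =>
      cases l with
      | nil => simp [gBody, strJoin_nil]
      | cons b t =>
          have h0 : k % 16 ≠ 0 := by simpa using hm 0 (by omega)
          have step : gBody k (b :: t) = ("\\x" ++ b) ++ gBody (k + 1) t := by
            rw [gBody, if_neg (fun hh => h0 hh.2)]
            simp
          rw [step, ih t (k + 1) (fun j hj => by have := hm (j + 1) (by omega); omega)]
          simp [List.take_succ_cons, List.drop_succ_cons, strJoin_empty_cons, String.append_assoc]
          rw [show k + 1 + m = k + (m + 1) by omega]

-- at a chunk boundary A's remaining loop output is B's chunked body (+ a leading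
-- separator for every boundary after the first)
theorem gBody_chunk (n : Nat) (l : List String) (hn : l.length ≤ n) (k : Nat) (hk : k % 16 = 0) :
    gBody k l = (if 0 < k ∧ l ≠ [] then "\\\n    " else "") ++ hBody l := by
  induction n generalizing l k with
  | zero =>
      have : l = [] := List.eq_nil_of_length_eq_zero (by omega)
      subst this; simp [gBody, hBody_nil]
  | succ n ih =>
      cases l with
      | nil => simp [gBody, hBody_nil]
      | cons b t =>
          rw [gBody]
          have h15 : gBody (k + 1) t
              = PySem.Str.join "" ((t.take 15).map (fun b => "\\x" ++ b)) ++ gBody (k + 16) (t.drop 15) := by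
            have := gBody_run 15 t (k + 1) (fun j hj => by omega)
            rwa [show k + 1 + 15 = k + 16 by omega] at this
          have hrec : gBody (k + 16) (t.drop 15)
              = (if 0 < k + 16 ∧ t.drop 15 ≠ [] then "\\\n    " else "") ++ hBody (t.drop 15) := by
            refine ih (t.drop 15) ?_ (k + 16) (by omega)
            have := List.length_drop (l := t) (i := 15)
            simp at hn ⊢; omega
          rw [h15, hrec, hBody_cons]
          have htake : (b :: t).take 16 = b :: t.take 15 := rfl
          have hdrop : (b :: t).drop 16 = t.drop 15 := rfl
          rw [htake, hdrop]
          simp only [List.map_cons, strJoin_empty_cons]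
          by_cases hd : t.drop 15 = []
          · rw [hd]
            simp [hBody, String.append_assoc, show (0:Nat) < k + 16 by omega]
            by_cases hk0 : 0 < k <;> simp [hk0, hk]
          · simp [hd, String.append_assoc, show (0:Nat) < k + 16 by omega]
            by_cases hk0 : 0 < k <;> simp [hk0, hk]

-- B's join of the chunk lines is the chunked body
theorem hBody_eq (n : Nat) (l : List String) (hn : l.length ≤ n) :
    PySem.Str.join "\\\n    " (bChunkLines (l.map (fun b => "\\x" ++ b))) = hBody l := by
  induction n generalizing l with
  | zero =>
      have : l = [] := List.eq_nil_of_length_eq_zero (by omega)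
      subst this; simp [bChunkLines_nil, strJoin_nil, hBody_nil]
  | succ n ih =>
      cases l with
      | nil => simp [bChunkLines_nil, strJoin_nil, hBody_nil]
      | cons b t =>
          rw [bChunkLines, if_neg (by simp)]
          rw [← List.map_take, ← List.map_drop]
          have hlen : (b :: t).drop 16 = t.drop 15 := rfl
          by_cases hd : (b :: t).drop 16 = []
          · rw [hd]
            simp only [List.map_nil, bChunkLines_nil]
            rw [strJoin_singleton, hBody_cons, hd]
            simp
          · have hne : ((b :: t).drop 16).map (fun b => "\\x" ++ b) ≠ [] := by
              simpa using hd
            rw [strJoin_cons_of_ne_nil _ _ _ (bChunkLines_ne_nil _ hne)]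
            rw [ih ((b :: t).drop 16) (by simp at hn ⊢; omega)]
            rw [hBody_cons, if_neg hd, String.append_assoc]

-- ===== VERDICT (by name: the statement is the Claim_ definition above) =====
theorem format_as_python_bytes_spec : Claim_equal_format_as_python_bytes := by
  intro opcodes _
  unfold Spec_format_as_python_bytes format_as_python_bytes format_as_python_bytes_alt
  by_cases h : opcodes = []
  · simp [h]
  · rw [if_neg h, if_neg h]
    simp only []
    have h0 : PySem.List.enumerate opcodes = PySem.List.enumerate opcodes ((0 : Nat) : Int) := by norm_num
    rw [h0, foldA_eq_gBody]
    rw [gBody_chunk opcodes.length opcodes le_rfl 0 (by omega)]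
    rw [bLines_eq_bChunkLines (opcodes.map (fun byte => "\\x" ++ byte)).length _ 0 (by omega), List.drop_zero]
    rw [hBody_eq opcodes.length opcodes le_rfl]
    simp
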